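-- pv_equiv track=rewrite | github.com/nbannayi/AoC2019 | Day17/AoCDay17.py | get_intcode_sequence
-- ===== SOURCE A (Python) =====
-- def get_intcode_sequence(input):
--     output = []
--
--     for token in str.split(input, ' '):
--         if token in ['L', 'R', 'A', 'B', 'C', ',']:
--             output.append(ord(token))
--         else:
--             for c in token:
--                 output.append(ord(c))
--
--     output.append(10)
--     return output
-- ===== SOURCE B (Python) =====
-- def get_intcode_sequence(input):
--     return [ord(c) for c in input if c != ' '] + [10]
-- ===== Notes on version B (the rewrite author's own statement) =====
-- stated objective: simpler
-- what changed: A splits the string into tokens and runs a special-case branch plus an inner per-character loop; B observes that both branches emit ord of every character and the split only discards spaces, so it is one flat comprehension over the characters filtering out spaces, plus the trailing 10.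
import Mathlib
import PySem

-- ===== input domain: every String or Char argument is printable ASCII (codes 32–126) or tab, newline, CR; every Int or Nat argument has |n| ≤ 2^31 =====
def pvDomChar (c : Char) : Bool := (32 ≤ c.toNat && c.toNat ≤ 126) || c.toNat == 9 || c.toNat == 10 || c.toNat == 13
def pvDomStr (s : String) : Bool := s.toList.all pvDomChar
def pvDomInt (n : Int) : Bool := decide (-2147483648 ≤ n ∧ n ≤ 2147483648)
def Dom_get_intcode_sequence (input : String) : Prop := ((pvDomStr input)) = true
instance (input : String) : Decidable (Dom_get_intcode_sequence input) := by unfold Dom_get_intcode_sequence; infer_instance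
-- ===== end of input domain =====

-- B replaces A's token split + branch + inner char loop by one flat pass emitting ord of every non-space character, then 10 (simpler; same result).


-- ===== PORT A =====
-- str.split(s, sep) for nonempty sep (exact: PySem.Chars.splitOn is the sep ≠ "" form of str.split)
def pySplit (s sep : String) : List String :=
  (PySem.Chars.splitOn s.toList sep.toList).map String.ofList

-- ord(token): in A's branch token is always one of the single-character strings 'L','R','A','B','C',',',
-- so the single-character case is the only one reached (Python's ord raises otherwise).
def pyOrdTok (s : String) : Int :=
  match s.toList with
  | [c] => (c.toNat : Int)
  | _ => 0

def get_intcode_sequence (input : String) : List Int :=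
  let output : List Int := []
  let output := (pySplit input " ").foldl (fun output token =>
    if token ∈ (["L", "R", "A", "B", "C", ","] : List String) then
      output ++ [pyOrdTok token]
    else
      token.toList.foldl (fun output c => output ++ [(c.toNat : Int)]) output) output
  output ++ [10]

-- ===== PORT B =====
def get_intcode_sequence_alt (input : String) : List Int :=
  (input.toList.filter (fun c => c != ' ')).map (fun c => (c.toNat : Int)) ++ [10]

-- ===== PRECONDITION & SPEC =====
def Spec_get_intcode_sequence (input : String) (out : List Int) : Prop := out = get_intcode_sequence_alt input
instance (input : String) (out : List Int) : Decidable (Spec_get_intcode_sequence input out) := by unfold Spec_get_intcode_sequence; infer_instance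

-- ===== CLAIM (what is proved, stated in full; the proofs are below) =====
def Claim_equal_get_intcode_sequence : Prop := ∀ (input : String), Dom_get_intcode_sequence input → Spec_get_intcode_sequence input (get_intcode_sequence input)

-- ===== LEMMAS AND PROOFS =====

-- Flattening PySem.Chars.splitOn.go with separator [' ']: the pieces joined are exactly the non-space characters.
lemma splitOn_go_space_flatten (fuel : Nat) :
    ∀ (l cur : List Char) (acc : List (List Char)), l.length < fuel →
      (PySem.Chars.splitOn.go [' '] fuel l cur acc).flatten
        = acc.reverse.flatten ++ cur.reverse ++ l.filter (fun c => c != ' ') := by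
  induction fuel with
  | zero => intro l cur acc h; omega
  | succ n ih =>
    intro l cur acc h
    cases l with
    | nil =>
      simp [PySem.Chars.splitOn.go]
    | cons c rest =>
      by_cases hc : c = ' '
      · subst hc
        have hpre : ([' '].isPrefixOf (' ' :: rest)) = true := by
          simp [List.isPrefixOf]
        rw [show PySem.Chars.splitOn.go [' '] (n+1) (' ' :: rest) cur acc
              = PySem.Chars.splitOn.go [' '] n (List.drop [' '].length (' ' :: rest)) [] (cur.reverse :: acc) by
              simp [PySem.Chars.splitOn.go, hpre]]
        rw [ih _ _ _ (by simp at h ⊢; omega)]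
        simp
      · have hpre : ([' '].isPrefixOf (c :: rest)) = false := by
          simp [List.isPrefixOf]
          intro hx; exact hc hx.symm
        rw [show PySem.Chars.splitOn.go [' '] (n+1) (c :: rest) cur acc
              = PySem.Chars.splitOn.go [' '] n rest (c :: cur) acc by
              simp [PySem.Chars.splitOn.go, hpre]]
        rw [ih _ _ _ (by simp at h ⊢; omega)]
        simp [hc]

lemma splitOn_space_flatten (s : List Char) :
    (PySem.Chars.splitOn s [' ']).flatten = s.filter (fun c => c != ' ') := by
  unfold PySem.Chars.splitOn
  rw [splitOn_go_space_flatten (s.length + 1) s [] [] (by omega)]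
  simp

-- Each token of A contributes the ords of its characters, in both branches.
lemma tok_emit (token : String) :
    (if token ∈ (["L", "R", "A", "B", "C", ","] : List String) then [pyOrdTok token]
     else token.toList.map (fun c => (c.toNat : Int)))
      = token.toList.map (fun c => (c.toNat : Int)) := by
  by_cases hm : token ∈ (["L", "R", "A", "B", "C", ","] : List String)
  · rw [if_pos hm]
    fin_cases hm <;> rfl
  · rw [if_neg hm]

-- ===== VERDICT (by name: the statement is the Claim_ definition above) =====
theorem get_intcode_sequence_spec : Claim_equal_get_intcode_sequence := by
  intro input _
  unfold Spec_get_intcode_sequence get_intcode_sequence get_intcode_sequence_alt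
  simp only [PySem.List.foldl_append_singleton_eq_map]
  have hfold :
      (pySplit input " ").foldl (fun output token =>
        if token ∈ (["L", "R", "A", "B", "C", ","] : List String) then
          output ++ [pyOrdTok token]
        else
          output ++ token.toList.map (fun c => (c.toNat : Int))) []
        = (pySplit input " ").flatMap (fun token => token.toList.map (fun c => (c.toNat : Int))) := by
    have := PySem.List.foldl_append_eq_flatMap
      (g := fun token => if token ∈ (["L", "R", "A", "B", "C", ","] : List String) then [pyOrdTok token]
                    else token.toList.map (fun c => (c.toNat : Int))) (l := pySplit input " ") (acc := ([] : List Int))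
    rw [show (fun (output : List Int) (token : String) =>
          if token ∈ (["L", "R", "A", "B", "C", ","] : List String) then output ++ [pyOrdTok token]
          else output ++ token.toList.map (fun c => (c.toNat : Int)))
        = (fun (output : List Int) (token : String) =>
          output ++ (if token ∈ (["L", "R", "A", "B", "C", ","] : List String) then [pyOrdTok token]
                     else token.toList.map (fun c => (c.toNat : Int)))) by
        funext o t; split <;> rfl]
    rw [this]
    simp only [List.nil_append]
    exact List.flatMap_congr (fun t _ => tok_emit t)
  rw [hfold]
  unfold pySplit
  rw [List.flatMap_map]
  have : (fun (cs : List Char) => (String.ofList cs).toList.map (fun c => (c.toNat : Int)))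
       = (fun (cs : List Char) => cs.map (fun c => (c.toNat : Int))) := by
    funext cs; simp
  rw [this, List.flatMap_def (l := PySem.Chars.splitOn input.toList " ".toList), ← List.map_flatten]
  rw [show (" ".toList : List Char) = [' '] from rfl, splitOn_space_flatten]
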